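-- pv_equiv track=rewrite | github.com/MarianaSoutelo/ATP2022 | TPC5/TPC5.py | doencaColesterol
-- ===== SOURCE A (Python) =====
-- def doencaColesterol(lista):
--     distribuicao = []
--     c = 0
--     while c < 540:
--         niveis = [c, c+10]
--         numPessoas = 0
--         for i in lista:
--             if i[-1] == "1" and niveis[0] <= int(i[3]) < niveis[1]:
--                 numPessoas = numPessoas + 1
--         distribuicao.append((niveis,numPessoas))
--         c = c + 10
--     return distribuicao
-- ===== SOURCE B (Python) =====
-- def doencaColesterol(lista):
--     cnt = [0] * 54
--     for i in lista:
--         if i[-1] == "1":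
--             v = int(i[3])
--             if 0 <= v < 540:
--                 cnt[v // 10] += 1
--     return [([10 * k, 10 * k + 10], cnt[k]) for k in range(54)]
-- ===== Notes on version B (the rewrite author's own statement) =====
-- stated objective: alternative
-- what changed: Replaces the 54 passes over the list (one per bin, each re-checking every row) with a single pass that parses each diseased row once and increments a 54-slot counter array indexed by value//10, then emits the bins from the array.
import Mathlib
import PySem

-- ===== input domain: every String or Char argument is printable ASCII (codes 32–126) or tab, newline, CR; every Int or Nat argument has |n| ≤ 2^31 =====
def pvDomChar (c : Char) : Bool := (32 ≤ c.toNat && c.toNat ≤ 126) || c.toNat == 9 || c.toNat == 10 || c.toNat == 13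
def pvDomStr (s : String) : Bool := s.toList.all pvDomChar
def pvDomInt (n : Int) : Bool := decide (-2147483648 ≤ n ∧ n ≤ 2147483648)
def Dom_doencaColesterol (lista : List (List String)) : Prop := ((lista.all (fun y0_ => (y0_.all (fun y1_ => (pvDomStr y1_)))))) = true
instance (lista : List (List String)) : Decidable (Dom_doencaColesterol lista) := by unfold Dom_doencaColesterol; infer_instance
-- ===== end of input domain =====

-- B replaces A's 54 passes over the list (one per bin) by one pass that buckets each
-- diseased row's cholesterol into a 54-slot counter array by value // 10 (objective: alternative).

-- ===== PORT A =====
-- body of A's inner 'for i in lista' loop (counts row i for the bin 'niveis')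
def pvConta (niveis : List Int) (numPessoas : Int) (i : List String) : Int :=
  if PySem.List.pyGetD i (-1) "" = "1" then
    match (PySem.List.pyGet? i 3).bind PySem.Int.ofStr? with
    | some v =>
        if PySem.List.pyGetD niveis 0 0 ≤ v ∧ v < PySem.List.pyGetD niveis 1 0 then
          numPessoas + 1
        else numPessoas
    | none => numPessoas   -- Python raises ValueError/IndexError here; excluded by Pre_
  else numPessoas

def doencaColesterol (lista : List (List String)) : List (List Int × Int) :=
  (PySem.List.pyRange 0 540 10).foldl (fun distribuicao c =>
    let niveis : List Int := [c, c + 10]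
    let numPessoas : Int := lista.foldl (pvConta niveis) 0
    distribuicao ++ [(niveis, numPessoas)]) []

-- ===== PORT B =====
-- body of B's single 'for i in lista' loop (buckets row i into the counter array)
def pvBucketStep (cnt : List Int) (i : List String) : List Int :=
  if PySem.List.pyGetD i (-1) "" = "1" then
    match (PySem.List.pyGet? i 3).bind PySem.Int.ofStr? with
    | some v =>
        if 0 ≤ v ∧ v < 540 then cnt.modify (PySem.Int.floordiv v 10).toNat (· + 1)
        else cnt
    | none => cnt   -- Python raises ValueError/IndexError here; excluded by Pre_
  else cnt

def doencaColesterol_alt (lista : List (List String)) : List (List Int × Int) :=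
  let cnt := lista.foldl pvBucketStep (List.replicate 54 0)
  (List.range 54).map (fun k => ([10 * (k : Int), 10 * (k : Int) + 10], PySem.List.pyGetD cnt (k : Int) 0))

-- ===== PRECONDITION & SPEC =====
-- Pre_ excludes exactly the inputs where Python A raises: a row that is empty (IndexError
-- on i[-1]) or a row ending in "1" whose i[3] is missing (IndexError) or not int-parsable
-- (ValueError).
def Pre_doencaColesterol (lista : List (List String)) : Prop :=
  ∀ i ∈ lista, i ≠ [] ∧
    (PySem.List.pyGetD i (-1) "" = "1" → ((PySem.List.pyGet? i 3).bind PySem.Int.ofStr?).isSome)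
instance (lista : List (List String)) : Decidable (Pre_doencaColesterol lista) := by
  unfold Pre_doencaColesterol; infer_instance
def pvWitness_doencaColesterol : List (List String) :=
  [["63", "1", "0", "233", "1"], ["45", "0", "1", "199", "0"]]
def Spec_doencaColesterol (lista : List (List String)) (out : List (List Int × Int)) : Prop := out = doencaColesterol_alt lista
instance (lista : List (List String)) (out : List (List Int × Int)) : Decidable (Spec_doencaColesterol lista out) := by unfold Spec_doencaColesterol; infer_instance

-- ===== CLAIM (what is proved, stated in full; the proofs are below) =====
def Claim_equal_doencaColesterol : Prop := ∀ (lista : List (List String)), Dom_doencaColesterol lista → Pre_doencaColesterol lista → Spec_doencaColesterol lista (doencaColesterol lista)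

-- ===== LEMMAS AND PROOFS =====

-- the parsed cholesterol value of row i, if the row counts at all (proof-only helper)
def pvRowVal (i : List String) : Option Int :=
  if PySem.List.pyGetD i (-1) "" = "1" then (PySem.List.pyGet? i 3).bind PySem.Int.ofStr? else none

-- 0/1 indicator of A's inner-loop increment for the bin [c, c+10)
def pvContaInd (c : Int) (i : List String) : Int :=
  match pvRowVal i with
  | some v => if c ≤ v ∧ v < c + 10 then 1 else 0
  | none => 0

lemma pvConta_eq_add (c : Int) (n : Int) (i : List String) :
    pvConta [c, c + 10] n i = n + pvContaInd c i := by
  unfold pvConta pvContaInd pvRowVal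
  by_cases h : PySem.List.pyGetD i (-1) "" = "1"
  case neg => simp [h]
  simp only [if_pos h]
  cases hv : (PySem.List.pyGet? i 3).bind PySem.Int.ofStr? with
  | none => simp
  | some v =>
      have h0 : PySem.List.pyGetD ([c, c + 10] : List Int) 0 0 = c := by
        simp [PySem.List.pyGetD, PySem.List.pyGet?, PySem.List.pyIdx?]
      have h1 : PySem.List.pyGetD ([c, c + 10] : List Int) 1 0 = c + 10 := by
        simp [PySem.List.pyGetD, PySem.List.pyGet?, PySem.List.pyIdx?]
      simp only [h0, h1]
      split_ifs <;> omega

lemma pvBucketStep_eq (cnt : List Int) (i : List String) :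
    pvBucketStep cnt i =
      match pvRowVal i with
      | some v =>
          if 0 ≤ v ∧ v < 540 then cnt.modify (PySem.Int.floordiv v 10).toNat (· + 1) else cnt
      | none => cnt := by
  unfold pvBucketStep pvRowVal
  by_cases h : PySem.List.pyGetD i (-1) "" = "1" <;> simp [h]

lemma pvFoldConta_shift (c : Int) (l : List (List String)) :
    ∀ a : Int, l.foldl (pvConta [c, c + 10]) a = a + l.foldl (pvConta [c, c + 10]) 0 := by
  induction l with
  | nil => intro a; simp
  | cons i rest ih =>
      intro a
      simp only [List.foldl_cons]
      rw [ih (pvConta [c, c + 10] a i), ih (pvConta [c, c + 10] 0 i),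
        pvConta_eq_add, pvConta_eq_add]
      omega

lemma pvFloordiv_bracket (v : Int) (k : Nat) (hk : k < 54) :
    (0 ≤ v ∧ v < 540) → ((PySem.Int.floordiv v 10).toNat = k ↔ 10 * (k : Int) ≤ v ∧ v < 10 * (k : Int) + 10) := by
  intro hv
  have hq : 0 ≤ PySem.Int.floordiv v 10 := by
    rw [PySem.Int.floordiv_eq_ediv_of_pos (by omega)]; exact Int.ediv_nonneg hv.1 (by omega)
  constructor
  · intro h
    have : PySem.Int.floordiv v 10 = (k : Int) := by omega
    have := (PySem.Int.floordiv_eq_iff_of_pos (a := v) (b := 10) (q := (k : Int)) (by omega)).1 this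
    omega
  · intro h
    have : PySem.Int.floordiv v 10 = (k : Int) :=
      (PySem.Int.floordiv_eq_iff_of_pos (a := v) (b := 10) (q := (k : Int)) (by omega)).2 (by omega)
    omega

lemma pvBucket_getD (lista : List (List String)) :
    ∀ (cnt : List Int), cnt.length = 54 → ∀ (k : Nat), k < 54 →
      (lista.foldl pvBucketStep cnt).getD k 0
        = cnt.getD k 0 + lista.foldl (pvConta [10 * (k : Int), 10 * (k : Int) + 10]) 0 := by
  induction lista with
  | nil => intro cnt _ k _; simp [List.foldl]
  | cons i rest ih =>
      intro cnt hlen k hk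
      have hlen' : (pvBucketStep cnt i).length = 54 := by
        rw [pvBucketStep_eq]
        cases pvRowVal i with
        | none => simpa using hlen
        | some v => dsimp only; split_ifs <;> simp [hlen]
      calc ((i :: rest).foldl pvBucketStep cnt).getD k 0
          = (rest.foldl pvBucketStep (pvBucketStep cnt i)).getD k 0 := rfl
        _ = (pvBucketStep cnt i).getD k 0
              + rest.foldl (pvConta [10 * (k : Int), 10 * (k : Int) + 10]) 0 := ih _ hlen' k hk
        _ = cnt.getD k 0 + (i :: rest).foldl (pvConta [10 * (k : Int), 10 * (k : Int) + 10]) 0 := by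
            have hstep : (pvBucketStep cnt i).getD k 0 = cnt.getD k 0 + pvContaInd (10 * (k : Int)) i := by
              rw [pvBucketStep_eq]
              unfold pvContaInd
              cases hv : pvRowVal i with
              | none => simp
              | some v =>
                  simp only
                  by_cases h54 : 0 ≤ v ∧ v < 540
                  · rw [if_pos h54]
                    by_cases hin : 10 * (k : Int) ≤ v ∧ v < 10 * (k : Int) + 10
                    · have hidx : (PySem.Int.floordiv v 10).toNat = k :=
                        (pvFloordiv_bracket v k hk h54).2 hin
                      rw [if_pos hin, hidx]
                      have hk' : k < cnt.length := by omega
                      rw [List.getD_eq_getElem?_getD, List.getD_eq_getElem?_getD]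
                      rw [List.getElem?_modify]
                      simp [hk']
                    · have hidx : (PySem.Int.floordiv v 10).toNat ≠ k := by
                        intro h; exact hin ((pvFloordiv_bracket v k hk h54).1 h)
                      rw [if_neg hin]
                      have hidx' : (v / 10).toNat ≠ k := by
                        rwa [PySem.Int.floordiv_eq_ediv_of_pos (by omega)] at hidx
                      rw [List.getD_eq_getElem?_getD, List.getD_eq_getElem?_getD]
                      rw [List.getElem?_modify]
                      simp [hidx']
                  · rw [if_neg h54]
                    have : ¬ (10 * (k : Int) ≤ v ∧ v < 10 * (k : Int) + 10) := by omega
                    rw [if_neg this]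
                    omega
            show _ = cnt.getD k 0 + rest.foldl (pvConta [10 * (k : Int), 10 * (k : Int) + 10])
                (pvConta [10 * (k : Int), 10 * (k : Int) + 10] 0 i)
            rw [hstep,
              pvFoldConta_shift (10 * (k : Int)) rest (pvConta [10 * (k : Int), 10 * (k : Int) + 10] 0 i),
              pvConta_eq_add]
            omega

lemma pvRange54 : PySem.List.pyRange 0 540 10 = (List.range 54).map (fun k => (10 * (k : Int))) := by
  decide

-- ===== VERDICT (by name: the statement is the Claim_ definition above) =====
theorem doencaColesterol_spec : Claim_equal_doencaColesterol := by
  intro lista _ _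
  show doencaColesterol lista = doencaColesterol_alt lista
  unfold doencaColesterol doencaColesterol_alt
  rw [PySem.List.foldl_append_singleton_eq_map, pvRange54, List.map_map]
  simp only [List.nil_append]
  apply List.map_congr_left
  intro k hk
  have hx : ∃ a : Nat, a < 54 ∧ k = (a : Int) := by simpa using hk
  obtain ⟨a, ha, rfl⟩ := hx
  have hcnt := pvBucket_getD lista (List.replicate 54 0) (by simp) a ha
  simp only [Function.comp_apply]
  rw [PySem.List.pyGetD_natCast, hcnt]
  have hz : (List.replicate 54 (0 : Int)).getD a 0 = 0 := by
    rw [List.getD_eq_getElem?_getD, List.getElem?_replicate]; simp [ha]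
  rw [hz, zero_add]
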